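-- pv_equiv track=rewrite | github.com/nebjj/String-Visualiser | app.py | render_rk
-- ===== SOURCE A (Python) =====
-- style = """
-- display:inline-block;
-- min-width:30px;
-- text-align:center;
-- margin:1px;
-- padding:6px;
-- border-radius:6px;
-- font-weight:bold;
-- """
--
-- def render_rk(text, pattern, start, m):
--     text_html = ""
--
--     for idx, ch in enumerate(text):
--         if start <= idx < start + m:
--             text_html += f'<span style="{style} background-color:red;">{ch}</span>'
--         else:
--             text_html += f'<span style="{style}">{ch}</span>'
--
--     space = "".join([f'<span style="{style} visibility:hidden;">X</span>' for _ in range(start)])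
--
--     pattern_html = "".join(
--         [f'<span style="{style} background-color:blue;">{ch}</span>' for ch in pattern]
--     )
--
--     return text_html, space + pattern_html
-- ===== SOURCE B (Python) =====
-- style = """
-- display:inline-block;
-- min-width:30px;
-- text-align:center;
-- margin:1px;
-- padding:6px;
-- border-radius:6px;
-- font-weight:bold;
-- """
--
-- def render_rk(text, pattern, start, m):
--     # Three-slice decomposition: clamp the highlighted window [start, start+m)
--     # to [0, len(text)), render pre / hit / post regions separately.
--     n = len(text)
--     lo = min(max(start, 0), n)
--     hi = min(max(start + m, lo), n)
--
--     normal = lambda ch: f'<span style="{style}">{ch}</span>'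
--     red = lambda ch: f'<span style="{style} background-color:red;">{ch}</span>'
--
--     text_html = (
--         "".join(map(normal, text[:lo]))
--         + "".join(map(red, text[lo:hi]))
--         + "".join(map(normal, text[hi:]))
--     )
--
--     space = f'<span style="{style} visibility:hidden;">X</span>' * max(start, 0)
--
--     pattern_html = "".join(
--         f'<span style="{style} background-color:blue;">{ch}</span>' for ch in pattern
--     )
--
--     return text_html, space + pattern_html
-- ===== Notes on version B (the rewrite author's own statement) =====
-- stated objective: simpler
-- what changed: Replaces the per-character index test inside the loop by a three-slice decomposition (pre / highlighted hit / post regions rendered separately with a clamped window), and replaces the range-join for the spacer by string repetition.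
import Mathlib
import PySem

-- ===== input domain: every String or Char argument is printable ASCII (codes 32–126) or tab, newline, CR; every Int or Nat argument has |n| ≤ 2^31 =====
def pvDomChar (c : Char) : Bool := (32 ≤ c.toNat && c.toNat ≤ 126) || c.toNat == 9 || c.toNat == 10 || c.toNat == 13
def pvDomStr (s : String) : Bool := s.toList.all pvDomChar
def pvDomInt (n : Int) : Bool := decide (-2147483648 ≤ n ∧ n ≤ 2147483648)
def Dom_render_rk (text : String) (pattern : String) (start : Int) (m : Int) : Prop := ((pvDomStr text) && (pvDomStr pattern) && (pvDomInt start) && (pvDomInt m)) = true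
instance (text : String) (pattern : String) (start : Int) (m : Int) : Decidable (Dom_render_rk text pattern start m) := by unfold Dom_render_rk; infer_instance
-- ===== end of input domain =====

-- B replaces A's per-character index test by a three-slice decomposition of
-- the text (objective: simpler); return values are identical on all inputs.

-- shared literal pieces (the f-string contents both Pythons share)
def rkStyle : List Char := "\ndisplay:inline-block;\nmin-width:30px;\ntext-align:center;\nmargin:1px;\npadding:6px;\nborder-radius:6px;\nfont-weight:bold;\n".toList

def rkSpanNorm (ch : Char) : List Char := "<span style=\"".toList ++ rkStyle ++ "\">".toList ++ [ch] ++ "</span>".toList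
def rkSpanRed (ch : Char) : List Char := "<span style=\"".toList ++ rkStyle ++ " background-color:red;\">".toList ++ [ch] ++ "</span>".toList
def rkSpanBlue (ch : Char) : List Char := "<span style=\"".toList ++ rkStyle ++ " background-color:blue;\">".toList ++ [ch] ++ "</span>".toList
def rkSpanHidden : List Char := "<span style=\"".toList ++ rkStyle ++ " visibility:hidden;\">X</span>".toList

-- ===== PORT A =====
-- literal port of A: a fold over enumerate(text) with the index test in the loop,
-- ''.join over range(start), ''.join over pattern (strings handled on the List Char side)
def render_rk (text : String) (pattern : String) (start : Int) (m : Int) : String × String :=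
  let text_html : List Char :=
    (PySem.List.enumerate text.toList).foldl
      (fun acc p =>
        if start ≤ p.1 ∧ p.1 < start + m then acc ++ rkSpanRed p.2
        else acc ++ rkSpanNorm p.2) []
  let space : List Char := ((PySem.List.pyRange 0 start 1).map (fun _ => rkSpanHidden)).flatten
  let pattern_html : List Char := (pattern.toList.map rkSpanBlue).flatten
  (String.ofList text_html, String.ofList (space ++ pattern_html))

-- ===== PORT B =====
-- literal port of Source B: clamp the window, slice into pre/hit/post, render each
-- region separately; spacer by repetition
def render_rk_alt (text : String) (pattern : String) (start : Int) (m : Int) : String × String :=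
  let cs := text.toList
  let n : Int := cs.length
  let lo : Int := min (max start 0) n
  let hi : Int := min (max (start + m) lo) n
  -- text[:lo], text[lo:hi], text[hi:] with 0 ≤ lo ≤ hi ≤ n
  let pre := cs.take lo.toNat
  let hit := (cs.drop lo.toNat).take (hi - lo).toNat
  let post := cs.drop hi.toNat
  let text_html : List Char :=
    (pre.map rkSpanNorm).flatten ++ (hit.map rkSpanRed).flatten ++ (post.map rkSpanNorm).flatten
  let space : List Char := (List.replicate (max start 0).toNat rkSpanHidden).flatten
  let pattern_html : List Char := (pattern.toList.map rkSpanBlue).flatten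
  (String.ofList text_html, String.ofList (space ++ pattern_html))

-- ===== PRECONDITION & SPEC =====
def Spec_render_rk (text : String) (pattern : String) (start : Int) (m : Int) (out : String × String) : Prop := out = render_rk_alt text pattern start m
instance (text : String) (pattern : String) (start : Int) (m : Int) (out : String × String) : Decidable (Spec_render_rk text pattern start m out) := by unfold Spec_render_rk; infer_instance

-- ===== CLAIM (what is proved, stated in full; the proofs are below) =====
def Claim_equal_render_rk : Prop := ∀ (text : String) (pattern : String) (start : Int) (m : Int), Dom_render_rk text pattern start m → Spec_render_rk text pattern start m (render_rk text pattern start m)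

-- ===== LEMMAS AND PROOFS =====

-- the loop body's if distributes over the accumulator append
theorem rk_foldl_if_eq_flatMap {α β : Type} (P : Int → Prop) [DecidablePred P]
    (f g : α → List β) (l : List (Int × α)) (acc : List β) :
    l.foldl (fun acc p => if P p.1 then acc ++ f p.2 else acc ++ g p.2) acc
      = acc ++ l.flatMap (fun p => if P p.1 then f p.2 else g p.2) := by
  have h : (fun (acc : List β) (p : Int × α) => if P p.1 then acc ++ f p.2 else acc ++ g p.2)
      = fun acc p => acc ++ (if P p.1 then f p.2 else g p.2) := by
    funext acc p; split <;> rfl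
  rw [h, PySem.List.foldl_append_eq_flatMap]

-- a segment on which the test is everywhere true renders with f
theorem rk_map_enumerate_true {α β : Type} (P : Int → Prop) [DecidablePred P]
    (f g : α → β) (l : List α) (s : Int)
    (h : ∀ i : Int, s ≤ i → i < s + l.length → P i) :
    (PySem.List.enumerate l s).map (fun p => if P p.1 then f p.2 else g p.2) = l.map f := by
  induction l generalizing s with
  | nil => simp [PySem.List.enumerate_nil]
  | cons x xs ih =>
    rw [PySem.List.enumerate_cons, List.map_cons, List.map_cons]
    have hP : P s := h s le_rfl (by simp only [List.length_cons]; push_cast; omega)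
    rw [if_pos hP, ih (s + 1) (fun i h1 h2 => h i (by omega)
      (by simp only [List.length_cons]; push_cast; omega))]

-- a segment on which the test is everywhere false renders with g
theorem rk_map_enumerate_false {α β : Type} (P : Int → Prop) [DecidablePred P]
    (f g : α → β) (l : List α) (s : Int)
    (h : ∀ i : Int, s ≤ i → i < s + l.length → ¬ P i) :
    (PySem.List.enumerate l s).map (fun p => if P p.1 then f p.2 else g p.2) = l.map g := by
  induction l generalizing s with
  | nil => simp [PySem.List.enumerate_nil]
  | cons x xs ih =>
    rw [PySem.List.enumerate_cons, List.map_cons, List.map_cons]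
    have hP : ¬ P s := h s le_rfl (by simp only [List.length_cons]; push_cast; omega)
    rw [if_neg hP, ih (s + 1) (fun i h1 h2 => h i (by omega)
      (by simp only [List.length_cons]; push_cast; omega))]

-- the text part: the enumerate fold equals the three-slice rendering
theorem rk_text_eq (cs : List Char) (start m : Int) :
    (PySem.List.enumerate cs).foldl
      (fun acc p => if start ≤ p.1 ∧ p.1 < start + m then acc ++ rkSpanRed p.2
        else acc ++ rkSpanNorm p.2) []
    = ((cs.take (min (max start 0) cs.length).toNat).map rkSpanNorm).flatten
      ++ (((cs.drop (min (max start 0) cs.length).toNat).take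
            (min (max (start + m) (min (max start 0) cs.length)) cs.length
              - min (max start 0) cs.length).toNat).map rkSpanRed).flatten
      ++ ((cs.drop (min (max (start + m) (min (max start 0) cs.length)) cs.length).toNat).map rkSpanNorm).flatten := by
  set n : Int := (cs.length : Int) with hn
  set lo : Int := min (max start 0) n with hlo
  set hi : Int := min (max (start + m) lo) n with hhi
  have h0lo : 0 ≤ lo := by omega
  have hlohi : lo ≤ hi := by omega
  have hhin : hi ≤ n := by omega
  set P : Int → Prop := fun i => start ≤ i ∧ i < start + m with hP
  have hsplit : cs = cs.take lo.toNat ++ ((cs.drop lo.toNat).take (hi - lo).toNat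
      ++ cs.drop hi.toNat) := by
    conv_lhs => rw [← List.take_append_drop lo.toNat cs]
    congr 1
    conv_lhs => rw [← List.take_append_drop (hi - lo).toNat (cs.drop lo.toNat)]
    rw [List.drop_drop]
    congr 2
    omega
  have hlen1 : ((cs.take lo.toNat).length : Int) = lo := by
    simp [List.length_take]; omega
  have hlen2 : (((cs.drop lo.toNat).take (hi - lo).toNat).length : Int) = hi - lo := by
    simp [List.length_take, List.length_drop]; omega
  rw [rk_foldl_if_eq_flatMap P rkSpanRed rkSpanNorm, List.nil_append, List.flatMap_def]
  conv_lhs => rw [hsplit]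
  rw [PySem.List.enumerate_append, PySem.List.enumerate_append,
      List.map_append, List.map_append, List.flatten_append, List.flatten_append]
  rw [rk_map_enumerate_false P rkSpanRed rkSpanNorm _ 0
      (by intro i h1 h2; rw [hlen1] at h2; simp [hP]; intro hsi; omega)]
  rw [rk_map_enumerate_true P rkSpanRed rkSpanNorm _ _
      (by intro i h1 h2; rw [hlen1] at h1 h2; rw [hlen2] at h2; simp [hP]; omega)]
  rw [rk_map_enumerate_false P rkSpanRed rkSpanNorm _ _
      (by intro i h1 h2
          rw [hlen1, hlen2] at h1 h2
          simp [List.length_drop] at h2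
          simp [hP]; intro hsi; omega)]
  rw [List.append_assoc]

-- the spacer: the range join equals the replicate join
theorem rk_space_eq (start : Int) :
    ((PySem.List.pyRange 0 start 1).map (fun _ => rkSpanHidden)).flatten
      = (List.replicate (max start 0).toNat rkSpanHidden).flatten := by
  have h : (PySem.List.pyRange 0 start 1).map (fun _ => rkSpanHidden)
      = List.replicate (max start 0).toNat rkSpanHidden := by
    rw [List.map_const', PySem.List.length_pyRange_one]
    congr 1; omega
  rw [h]

-- ===== VERDICT (by name: the statement is the Claim_ definition above) =====
theorem render_rk_spec : Claim_equal_render_rk := by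
  intro text pattern start m _
  unfold Spec_render_rk render_rk render_rk_alt
  simp only []
  rw [rk_text_eq, rk_space_eq]
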